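-- pv_equiv track=rewrite | github.com/abelcain/aminet | python/sn42.py | format_directory_structure
-- ===== SOURCE A (Python) =====
-- def format_directory_structure(paths, extensions):
--     """Formats a list of file/directory paths into a hierarchical structure.
--
--     Args:
--       paths: A list of file/directory paths.
--       extensions: A set of file extensions to be recognized.
--     Returns:
--       A formatted string representing the hierarchical directory structure.
--     """
--     tree = {}
--
--     for path in paths:
--         parts = path.split('/')
--         current_level = tree
--         for part in parts[:-1]:
--             if part not in current_level:
--                 current_level[part] = {}
--             current_level = current_level[part]
--
--         last_part = parts[-1]
--         if '.' in last_part: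
--             base_name, ext = last_part.rsplit('.', 1)
--             if ext in extensions:
--                 if base_name:
--                     if base_name not in current_level:
--                         current_level[base_name] = {f'.{ext}': {}}
--                     elif isinstance(current_level[base_name], dict):
--                         current_level[base_name][f'.{ext}'] = {}
--                 else:
--                     current_level[f'.{ext}'] = {}
--             else:
--                 if last_part not in current_level:
--                     current_level[last_part] = {}
--         else:
--             if last_part not in current_level:
--                 current_level[last_part] = {}
--
--     def build_output(node, indent=""):
--         output = ""
--         for item in sorted(node.keys()):
--             output += f"{indent}{item}\n"
--             output += build_output(node[item], indent + "  ")
--         return output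
--
--     return build_output(tree)
--
--     """Formats a list of file/directory paths into a hierarchical structure.
--
--     Args:
--       paths: A list of file/directory paths.
--     Returns:
--       A formatted string representing the hierarchical directory structure.
--     """
--     tree = {}
--     for path in paths:
--         parts = path.split('/')
--         current_level = tree
--         for part in parts[:-1]:
--             if part not in current_level:
--                 current_level[part] = {}
--             current_level = current_level[part]
--
--         last_part = parts[-1]
--         if last_part.endswith('.info'):
--             base_name = last_part[:-5]  # remove '.info'
--             if base_name:
--                 if base_name not in current_level:
--                     current_level[base_name] = {'.info': {}}
--                 elif isinstance(current_level[base_name], dict):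
--                     current_level[base_name]['.info'] = {}
--             else:
--                 current_level['.info'] = {}
--         else:
--             if last_part not in current_level:
--                 current_level[last_part] = {}
--
--     def build_output(node, indent=""):
--         output = ""
--         for item in sorted(node.keys()):
--             output += f"{indent}{item}\n"
--             output += build_output(node[item], indent + "  ")
--         return output
--
--     return build_output(tree)
-- ===== SOURCE B (Python) =====
-- def format_directory_structure(paths, extensions):
--     """Formats a list of file/directory paths into a hierarchical structure."""
--     tree = {}
--
--     def insert(node, parts):
--         head = parts[0]
--         if len(parts) > 1:
--             insert(node.setdefault(head, {}), parts[1:])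
--         elif '.' in head:
--             base, ext = head.rsplit('.', 1)
--             if ext in extensions:
--                 if base:
--                     node.setdefault(base, {})['.' + ext] = {}
--                 else:
--                     node['.' + ext] = {}
--             else:
--                 node.setdefault(head, {})
--         else:
--             node.setdefault(head, {})
--
--     for path in paths:
--         insert(tree, path.split('/'))
--
--     lines = []
--     stack = [(name, tree[name], '') for name in sorted(tree, reverse=True)]
--     while stack:
--         name, node, indent = stack.pop()
--         lines.append(indent + name + '\n')
--         child_indent = indent + '  '
--         for child in sorted(node, reverse=True):
--             stack.append((child, node[child], child_indent))
--     return ''.join(lines)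
-- ===== Notes on version B (the rewrite author's own statement) =====
-- stated objective: alternative
-- what changed: B builds the trie with a recursive insert using dict.setdefault instead of A's iterative descent with explicit membership tests, and renders it with an explicit stack of (name, node, indent) entries pushed in reverse-sorted order plus a single ''.join over a list of lines, instead of A's recursive build_output accumulating a string with +=.
import Mathlib
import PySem

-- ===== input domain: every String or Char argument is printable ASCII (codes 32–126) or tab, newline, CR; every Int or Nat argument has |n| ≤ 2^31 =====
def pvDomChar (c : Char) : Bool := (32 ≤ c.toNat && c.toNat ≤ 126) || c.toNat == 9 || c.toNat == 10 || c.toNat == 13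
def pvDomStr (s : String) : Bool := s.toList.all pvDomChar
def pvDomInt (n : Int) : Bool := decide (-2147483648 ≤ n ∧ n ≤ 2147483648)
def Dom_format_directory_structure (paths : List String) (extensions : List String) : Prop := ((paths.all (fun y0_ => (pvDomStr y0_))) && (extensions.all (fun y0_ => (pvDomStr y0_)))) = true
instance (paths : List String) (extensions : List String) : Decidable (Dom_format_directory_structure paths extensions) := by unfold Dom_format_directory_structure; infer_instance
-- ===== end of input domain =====

-- B builds the trie by a recursive insert with setdefault (instead of A's iterative
-- descent with explicit membership tests) and renders it with an explicit stack and a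
-- list of lines joined once (instead of A's recursive build_output with string +=).

-- ===== PORT A =====
-- the nested dict 'tree': every value is again a dict, so a forest of (key, subdict, rest)
inductive PForest : Type where
  | nil : PForest
  | cons : String → PForest → PForest → PForest
deriving DecidableEq, Repr

def fKeys : PForest → List String
  | .nil => []
  | .cons k _ r => k :: fKeys r

def fContains : PForest → String → Bool   -- 'part in current_level'
  | .nil, _ => false
  | .cons k' _ r, k => k' == k || fContains r k

def fGet : PForest → String → PForest     -- current_level[k] (only used on present keys)
  | .nil, _ => .nil
  | .cons k' c r, k => if k' == k then c else fGet r k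

def fSet : PForest → String → PForest → PForest   -- current_level[k] = v (overwrite keeps position, new keys append)
  | .nil, k, v => .cons k v .nil
  | .cons k' c r, k, v => if k' == k then .cons k' v r else .cons k' c (fSet r k v)

def fSize : PForest → Nat
  | .nil => 1
  | .cons _ c r => 1 + fSize c + fSize r

-- termination measure fact used by the ports' output recursions
theorem fGet_size_lt : ∀ (f : PForest) (k : String), k ∈ fKeys f → fSize (fGet f k) < fSize f := by
  intro f k h
  induction f with
  | nil => simp [fKeys] at h
  | cons k' c r _ ihr =>
    simp only [fKeys, List.mem_cons] at h
    cases hbe : (k' == k) with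
    | true => simp [fGet, hbe, fSize]; omega
    | false =>
      rcases h with h | h
      · simp [h] at hbe
      · simp only [fGet, hbe, Bool.false_eq_true, if_false, fSize]
        have := ihr h
        omega

-- s.rsplit('.', 1) as (base, ext); exact for strings that contain a '.', the only case it is used in
def rsplitDot (cs : List Char) : List Char × List Char :=
  (((cs.reverse.dropWhile (· ≠ '.')).tail).reverse, (cs.reverse.takeWhile (· ≠ '.')).reverse)

-- the body handling parts[-1]
def insertLast (f : PForest) (last : String) (extensions : List String) : PForest :=
  if PySem.Str.isIn "." last then
    let be := rsplitDot last.toList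
    if extensions.contains (String.ofList be.2) then
      if String.ofList be.1 ≠ "" then
        if !(fContains f (String.ofList be.1)) then
          fSet f (String.ofList be.1) (.cons (String.ofList ('.' :: be.2)) .nil .nil)
        else
          -- isinstance(current_level[base_name], dict) is always True: every stored value is a dict
          fSet f (String.ofList be.1) (fSet (fGet f (String.ofList be.1)) (String.ofList ('.' :: be.2)) .nil)
      else fSet f (String.ofList ('.' :: be.2)) .nil
    else if !(fContains f last) then fSet f last .nil else f
  else if !(fContains f last) then fSet f last .nil else f

-- the per-path loop body: descend along parts[:-1] creating missing dicts, then handle parts[-1]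
def insertParts (f : PForest) (parts : List String) (extensions : List String) : PForest :=
  match parts with
  | [] => f   -- unreachable: str.split never returns []
  | [last] => insertLast f last extensions
  | p :: rest => fSet f p (insertParts (if fContains f p then fGet f p else .nil) rest extensions)

-- build_output(node, indent): output += indent + item + "\n" over sorted keys, then recurse with indent + "  "
def buildOutput (f : PForest) (indent : List Char) : List Char :=
  (PySem.List.sorted (fKeys f) (fun x => x)).attach.foldl
    (fun out kh =>
      out ++ indent ++ kh.1.toList ++ ['\n'] ++ buildOutput (fGet f kh.1) (indent ++ [' ', ' ']))
    []
termination_by fSize f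
decreasing_by
  exact fGet_size_lt f kh.1 ((PySem.List.mem_sorted _ _ _ _).mp kh.2)

def format_directory_structure (paths : List String) (extensions : List String) : String :=
  let tree := paths.foldl
    (fun f path => insertParts f ((PySem.Str.split? path "/").getD []) extensions) .nil
  String.ofList (buildOutput tree [])

-- ===== PORT B =====
-- node.setdefault(k, {}) as an expression: the child stored at k (inserted empty if absent)
def getdefault (f : PForest) (k : String) : PForest :=
  if fContains f k then fGet f k else .nil

-- insert(node, parts): recursive descent with setdefault
def insertB (extensions : List String) (node : PForest) : List String → PForest
  | [] => node   -- unreachable: str.split never returns []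
  | [head] =>
    if PySem.Str.isIn "." head then
      let be := rsplitDot head.toList
      if extensions.contains (String.ofList be.2) then
        if String.ofList be.1 ≠ "" then
          fSet node (String.ofList be.1)
            (fSet (getdefault node (String.ofList be.1)) (String.ofList ('.' :: be.2)) .nil)
        else fSet node (String.ofList ('.' :: be.2)) .nil
      else fSet node head (getdefault node head)
    else fSet node head (getdefault node head)
  | head :: next :: rest =>
    fSet node head (insertB extensions (getdefault node head) (next :: rest))

-- termination facts for the stack loop: pushing a node's (distinct) children replaces
-- its weight by strictly less total weight
theorem foldl_push {α β : Type} (g : α → β) :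
    ∀ (l : List α) (st : List β), l.foldl (fun st k => g k :: st) st = l.reverse.map g ++ st := by
  intro l
  induction l with
  | nil => intro st; simp
  | cons a t ih => intro st; simp [ih]

theorem sum_fGet_lt (f : PForest) :
    ∀ (l : List String), l.Nodup → (∀ k ∈ l, k ∈ fKeys f) →
      (l.map (fun k => fSize (fGet f k))).sum < fSize f := by
  induction f with
  | nil =>
    intro l _ hmem
    cases l with
    | nil => simp [fSize]
    | cons a t => exact absurd (hmem a List.mem_cons_self) (by simp [fKeys])
  | cons k c r _ ihr =>
    intro l hnd hmem
    by_cases hk : k ∈ l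
    · have hperm : l.Perm (k :: l.erase k) := List.perm_cons_erase hk
      have hsum : (l.map (fun k' => fSize (fGet (.cons k c r) k'))).sum =
          ((k :: l.erase k).map (fun k' => fSize (fGet (.cons k c r) k'))).sum :=
        (hperm.map _).sum_eq
      rw [hsum, List.map_cons, List.sum_cons]
      have hget : fGet (.cons k c r) k = c := by simp [fGet]
      rw [hget]
      have hmap : (l.erase k).map (fun k' => fSize (fGet (.cons k c r) k')) =
          (l.erase k).map (fun k' => fSize (fGet r k')) := by
        apply List.map_congr_left
        intro k' hk'
        have hne : k' ≠ k := (List.Nodup.mem_erase_iff hnd |>.mp hk').1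
        have hbe : (k == k') = false := beq_eq_false_iff_ne.mpr (Ne.symm hne)
        simp [fGet, hbe]
      rw [hmap]
      have hrest : ((l.erase k).map (fun k' => fSize (fGet r k'))).sum < fSize r := by
        refine ihr _ (hnd.erase k) ?_
        intro k' hk'
        have hne : k' ≠ k := (List.Nodup.mem_erase_iff hnd |>.mp hk').1
        have := hmem k' (List.mem_of_mem_erase hk')
        simp only [fKeys, List.mem_cons] at this
        tauto
      simp only [fSize]
      omega
    · have hmap : l.map (fun k' => fSize (fGet (.cons k c r) k')) =
          l.map (fun k' => fSize (fGet r k')) := by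
        apply List.map_congr_left
        intro k' hk'
        have hne : k' ≠ k := fun h => hk (h ▸ hk')
        have hbe : (k == k') = false := beq_eq_false_iff_ne.mpr (Ne.symm hne)
        simp [fGet, hbe]
      rw [hmap]
      have := ihr l hnd (by
        intro k' hk'
        have := hmem k' hk'
        have hne : k' ≠ k := fun h => hk (h ▸ hk')
        simp only [fKeys, List.mem_cons] at this
        tauto)
      simp only [fSize]
      omega

theorem push_children_sum_lt (node : PForest) (ind2 : List Char)
    (rest : List (String × PForest × List Char)) :
    ((((PySem.List.sorted (fKeys node).dedup (fun k => k) true).foldl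
        (fun st k => (k, fGet node k, ind2) :: st) rest).map (fun e => fSize e.2.1)).sum) <
      fSize node + (rest.map (fun e => fSize e.2.1)).sum := by
  rw [foldl_push]
  rw [List.map_append, List.sum_append, List.map_map]
  have hnd : ((PySem.List.sorted (fKeys node).dedup (fun k => k) true).reverse).Nodup := by
    rw [List.nodup_reverse]
    exact ((PySem.List.sorted_perm _ _ _).symm.nodup ((fKeys node).nodup_dedup))
  have hmem : ∀ k ∈ (PySem.List.sorted (fKeys node).dedup (fun k => k) true).reverse,
      k ∈ fKeys node := by
    intro k hk
    rw [List.mem_reverse] at hk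
    exact (fKeys node).dedup_subset ((PySem.List.mem_sorted _ _ _ _).mp hk)
  have := sum_fGet_lt node _ hnd hmem
  have hcomp : ((PySem.List.sorted (fKeys node).dedup (fun k => k) true).reverse).map
      ((fun e : String × PForest × List Char => fSize e.2.1) ∘ (fun k => (k, fGet node k, ind2))) =
      ((PySem.List.sorted (fKeys node).dedup (fun k => k) true).reverse).map
      (fun k => fSize (fGet node k)) := by
    apply List.map_congr_left
    intro k _
    rfl
  rw [hcomp]
  omega

-- the while-stack loop: pop (name, node, indent), emit its line, push the children in
-- reverse-sorted order (so the smallest key is popped next); stack head = top of stack,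
-- dict keys are distinct so .dedup only certifies that for the termination argument
def renderStack : List (String × PForest × List Char) → List (List Char)
  | [] => []
  | (name, node, ind) :: rest =>
    (ind ++ name.toList ++ ['\n']) ::
      renderStack ((PySem.List.sorted (fKeys node).dedup (fun k => k) true).foldl
        (fun st k => (k, fGet node k, ind ++ [' ', ' ']) :: st) rest)
termination_by st => (st.map (fun e => fSize e.2.1)).sum
decreasing_by
  exact push_children_sum_lt node (ind ++ [' ', ' ']) rest

def format_directory_structure_alt (paths : List String) (extensions : List String) : String :=
  let tree := paths.foldl
    (fun node path => insertB extensions node ((PySem.Str.split? path "/").getD [])) .nil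
  let stack := (PySem.List.sorted (fKeys tree).dedup (fun k => k) true).foldl
    (fun st name => (name, fGet tree name, ([] : List Char)) :: st) []
  String.ofList (renderStack stack).flatten

-- ===== PRECONDITION & SPEC =====
def Spec_format_directory_structure (paths : List String) (extensions : List String) (out : String) : Prop := out = format_directory_structure_alt paths extensions
instance (paths : List String) (extensions : List String) (out : String) : Decidable (Spec_format_directory_structure paths extensions out) := by unfold Spec_format_directory_structure; infer_instance

-- ===== CLAIM (what is proved, stated in full; the proofs are below) =====
def Claim_equal_format_directory_structure : Prop := ∀ (paths : List String) (extensions : List String), Dom_format_directory_structure paths extensions → Spec_format_directory_structure paths extensions (format_directory_structure paths extensions)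

-- ===== LEMMAS AND PROOFS =====

-- the trees A builds have distinct keys at every level
def fWf : PForest → Prop
  | .nil => True
  | .cons k c r => (k ∉ fKeys r) ∧ fWf c ∧ fWf r

-- the node paths of f, listed in preorder with sorted keys
def canon (f : PForest) : List (List String) :=
  (PySem.List.sorted (fKeys f) (fun x => x)).attach.flatMap
    (fun kh => [kh.1] :: (canon (fGet f kh.1)).map (kh.1 :: ·))
termination_by fSize f
decreasing_by
  exact fGet_size_lt f kh.1 ((PySem.List.mem_sorted _ _ _ _).mp kh.2)

def renderLine (ind : List Char) (q : List String) : List Char :=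
  ind ++ List.replicate (2 * (q.length - 1)) ' ' ++ (PySem.List.pyGetD q (-1) "").toList ++ ['\n']

theorem mem_fKeys_fSet (f : PForest) (k j : String) (v : PForest) :
    j ∈ fKeys (fSet f k v) ↔ j ∈ fKeys f ∨ j = k := by
  induction f with
  | nil => simp [fSet, fKeys]
  | cons k' c r _ ihr =>
    cases hbe : (k' == k) with
    | true =>
      have hk : k' = k := by simpa using hbe
      subst hk
      simp [fSet, fKeys]
      tauto
    | false =>
      simp [fSet, hbe, fKeys, ihr]
      tauto

theorem fWf_fSet (f : PForest) (k : String) (v : PForest) (hf : fWf f) (hv : fWf v) :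
    fWf (fSet f k v) := by
  induction f with
  | nil => exact ⟨by simp [fKeys], hv, trivial⟩
  | cons k' c r _ ihr =>
    obtain ⟨hnotin, hwc, hwr⟩ := hf
    cases hbe : (k' == k) with
    | true =>
      have hk : k' = k := by simpa using hbe
      subst hk
      have hrw : fSet (.cons k' c r) k' v = .cons k' v r := by simp [fSet]
      rw [hrw]
      exact ⟨hnotin, hv, hwr⟩
    | false =>
      have hk : k' ≠ k := by simpa using hbe
      have hni : k' ∉ fKeys (fSet r k v) := by
        rw [mem_fKeys_fSet]
        rintro (hmem | hEq)
        · exact hnotin hmem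
        · exact hk hEq
      have hrw : fSet (.cons k' c r) k v = .cons k' c (fSet r k v) := by simp [fSet, hbe]
      rw [hrw]
      exact ⟨hni, hwc, ihr hwr⟩

theorem fWf_keys_nodup (f : PForest) (h : fWf f) : (fKeys f).Nodup := by
  induction f with
  | nil => simp [fKeys]
  | cons k c r _ ihr =>
    obtain ⟨hnotin, _, hwr⟩ := h
    simpa [fKeys] using ⟨hnotin, ihr hwr⟩

theorem fWf_fGet (f : PForest) (k : String) (h : fWf f) : fWf (fGet f k) := by
  induction f with
  | nil => trivial
  | cons k' c r _ ihr =>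
    obtain ⟨_, hwc, hwr⟩ := h
    cases hbe : (k' == k) with
    | true => simpa [fGet, hbe] using hwc
    | false => simpa [fGet, hbe] using ihr hwr

theorem fWf_insertLast (extensions : List String) (last : String) (f : PForest) (hf : fWf f) :
    fWf (insertLast f last extensions) := by
  unfold insertLast
  dsimp only
  split_ifs
  all_goals first
    | exact hf
    | exact fWf_fSet _ _ _ hf trivial
    | exact fWf_fSet _ _ _ hf ⟨by simp [fKeys], trivial, trivial⟩
    | exact fWf_fSet _ _ _ hf (fWf_fSet _ _ PForest.nil (fWf_fGet _ _ hf) trivial)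

theorem fWf_insertParts (extensions : List String) (parts : List String) (f : PForest)
    (hf : fWf f) : fWf (insertParts f parts extensions) := by
  induction parts generalizing f hf with
  | nil => simpa [insertParts] using hf
  | cons p rest ih =>
    cases rest with
    | nil => simpa [insertParts] using fWf_insertLast extensions p f hf
    | cons p2 rest2 =>
      simp only [insertParts]
      refine fWf_fSet _ _ _ hf (ih _ ?_)
      split_ifs with hc
      · exact fWf_fGet _ _ hf
      · trivial

-- ----- the two builds agree -----
theorem fSet_fGet_self (f : PForest) (k : String) (h : fContains f k = true) :
    fSet f k (fGet f k) = f := by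
  induction f with
  | nil => simp [fContains] at h
  | cons k' c r _ ihr =>
    cases hbe : (k' == k) with
    | true => simp [fSet, fGet, hbe]
    | false =>
      have hr : fContains r k = true := by simpa [fContains, hbe] using h
      simp [fSet, fGet, hbe, ihr hr]

theorem insertB_eq (extensions : List String) :
    ∀ (parts : List String) (f : PForest),
      insertB extensions f parts = insertParts f parts extensions := by
  intro parts
  induction parts with
  | nil => intro f; rfl
  | cons head rest ih =>
    intro f
    cases rest with
    | nil =>
      show insertB extensions f [head] = insertLast f head extensions
      rw [insertB, insertLast]
      dsimp only
      split_ifs with h1 h2 h3 h4 h5 h6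
      · have hc : fContains f (String.ofList (rsplitDot head.toList).1) = false := by
          simpa using h4
        simp [getdefault, hc, fSet]
      · have hc : fContains f (String.ofList (rsplitDot head.toList).1) = true := by
          simpa using h4
        simp [getdefault, hc]
      · rfl
      · have hc : fContains f head = false := by simpa using h5
        simp [getdefault, hc]
      · have hc : fContains f head = true := by simpa using h5
        simp [getdefault, hc, fSet_fGet_self f head hc]
      · have hc : fContains f head = false := by simpa using h6
        simp [getdefault, hc]
      · have hc : fContains f head = true := by simpa using h6
        simp [getdefault, hc, fSet_fGet_self f head hc]
    | cons next rest2 =>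
      show fSet f head (insertB extensions (getdefault f head) (next :: rest2)) =
        fSet f head (insertParts (if fContains f head then fGet f head else .nil) (next :: rest2) extensions)
      rw [ih]
      rfl

theorem builds_eq (extensions : List String) (paths : List String) :
    paths.foldl (fun node path => insertB extensions node ((PySem.Str.split? path "/").getD [])) .nil =
      paths.foldl (fun f path => insertParts f ((PySem.Str.split? path "/").getD []) extensions) .nil := by
  have hfun : (fun node path => insertB extensions node ((PySem.Str.split? path "/").getD [])) =
      (fun f path => insertParts f ((PySem.Str.split? path "/").getD []) extensions) := by
    funext f p
    exact insertB_eq extensions _ f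
  rw [hfun]

theorem fWf_build (extensions : List String) (paths : List String) :
    fWf (paths.foldl (fun f path => insertParts f ((PySem.Str.split? path "/").getD []) extensions) .nil) := by
  suffices h : ∀ (f : PForest), fWf f →
      fWf (paths.foldl (fun f path => insertParts f ((PySem.Str.split? path "/").getD []) extensions) f) by
    exact h .nil trivial
  induction paths with
  | nil => intro f hf; exact hf
  | cons p rest ih =>
    intro f hf
    exact ih _ (fWf_insertParts _ _ _ hf)

-- ----- the two renderings agree -----
theorem pairwise_lt_of_le_nodup (l : List String) (hle : l.Pairwise (· ≤ ·)) (hnd : l.Nodup) :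
    l.Pairwise (· < ·) := by
  induction l with
  | nil => exact List.Pairwise.nil
  | cons a t ih =>
    rw [List.pairwise_cons] at hle ⊢
    rw [List.nodup_cons] at hnd
    refine ⟨?_, ih hle.2 hnd.2⟩
    intro b hb
    exact lt_of_le_of_ne (hle.1 b hb) (fun h => hnd.1 (h ▸ hb))

-- reverse-sorting the (distinct) keys and reading the stack back gives the ascending sort
theorem desc_reverse_eq (l : List String) (h : l.Nodup) :
    (PySem.List.sorted l.dedup (fun k => k) true).reverse = PySem.List.sorted l (fun x => x) := by
  rw [List.dedup_eq_self.mpr h]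
  have hp : ((PySem.List.sorted l (fun x => x)).reverse).Perm l :=
    (List.reverse_perm _).trans (PySem.List.sorted_perm _ _ _)
  have hnd : (PySem.List.sorted l (fun x => x)).Nodup :=
    (PySem.List.sorted_perm l (fun x => x) false).symm.nodup h
  have hpl : (PySem.List.sorted l (fun x => x)).Pairwise (· < ·) :=
    pairwise_lt_of_le_nodup _ (PySem.List.sorted_pairwise l (fun x => x)) hnd
  have hpr : ((PySem.List.sorted l (fun x => x)).reverse).Pairwise (fun a b => (b : String) < a) := by
    rw [List.pairwise_reverse]
    exact hpl
  have := PySem.List.sorted_rev_eq_of_perm_of_pairwise_gt l _ (fun k => k) hp hpr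
  rw [this, List.reverse_reverse]

theorem canon_ne_nil (f : PForest) : ∀ q ∈ canon f, q ≠ [] := by
  intro q hq
  rw [canon] at hq
  rw [List.mem_flatMap] at hq
  obtain ⟨kh, -, hq⟩ := hq
  rw [List.mem_cons] at hq
  rcases hq with hq | hq
  · simp [hq]
  · rw [List.mem_map] at hq
    obtain ⟨t, -, rfl⟩ := hq
    simp

theorem renderLine_cons (ind : List Char) (k : String) (t : List String) (ht : t ≠ []) :
    renderLine ind (k :: t) = renderLine (ind ++ [' ', ' ']) t := by
  unfold renderLine
  rw [PySem.List.pyGetD_neg_one _ _ (by simp), PySem.List.pyGetD_neg_one _ _ ht,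
    List.getLast_cons ht]
  cases t with
  | nil => exact absurd rfl ht
  | cons x xs =>
    have hlen : 2 * ((k :: x :: xs).length - 1) = (x :: xs).length * 2 := by simp; omega
    have hlen2 : (x :: xs).length * 2 = 2 * ((x :: xs).length - 1) + 2 := by simp; omega
    rw [hlen, hlen2]
    simp [List.replicate_succ]

theorem renderLine_single (ind : List Char) (k : String) :
    renderLine ind [k] = ind ++ k.toList ++ ['\n'] := by
  unfold renderLine
  rw [PySem.List.pyGetD_neg_one _ _ (by simp)]
  simp

theorem buildOutput_eq_canon_aux (n : Nat) :
    ∀ (f : PForest) (ind : List Char), fSize f ≤ n →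
      buildOutput f ind = ((canon f).map (renderLine ind)).flatten := by
  induction n with
  | zero => intro f ind hle; cases f <;> simp [fSize] at hle
  | succ n ihn =>
    intro f ind hle
    rw [buildOutput, canon]
    simp only [List.append_assoc]
    rw [PySem.List.foldl_append_eq_flatMap
      (g := fun kh : {x // x ∈ PySem.List.sorted (fKeys f) (fun x => x)} =>
        ind ++ (kh.1.toList ++ (['\n'] ++ buildOutput (fGet f kh.1) (ind ++ [' ', ' '])))),
      List.nil_append, List.map_flatMap]
    have hflat : ∀ (l : List {x // x ∈ PySem.List.sorted (fKeys f) (fun x => x)})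
        (g : {x // x ∈ PySem.List.sorted (fKeys f) (fun x => x)} → List (List Char)),
        (l.flatMap g).flatten = l.flatMap (fun a => (g a).flatten) := by
      intro l g
      induction l with
      | nil => simp
      | cons a t ih => simp [ih]
    rw [hflat]
    congr 1
    funext kh
    have hk : kh.1 ∈ fKeys f := (PySem.List.mem_sorted _ _ _ _).mp kh.2
    have hsz : fSize (fGet f kh.1) ≤ n := by
      have := fGet_size_lt f kh.1 hk
      omega
    have hih := ihn (fGet f kh.1) (ind ++ [' ', ' ']) hsz
    simp only [List.map_cons, List.flatten_cons, List.map_map]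
    have hmap : (canon (fGet f kh.1)).map (renderLine ind ∘ (kh.1 :: ·)) =
        (canon (fGet f kh.1)).map (renderLine (ind ++ [' ', ' '])) := by
      apply List.map_congr_left
      intro t ht
      exact renderLine_cons ind kh.1 t (canon_ne_nil _ t ht)
    rw [hmap, ← hih]
    unfold renderLine
    rw [PySem.List.pyGetD_neg_one _ _ (by simp)]
    simp

theorem buildOutput_eq_canon (f : PForest) (ind : List Char) :
    buildOutput f ind = ((canon f).map (renderLine ind)).flatten :=
  buildOutput_eq_canon_aux (fSize f) f ind le_rfl

-- the per-node block of lines, as the stack loop produces them for one entry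
theorem canon_map_renderLine (node : PForest) (ind : List Char) :
    (canon node).map (renderLine ind) =
      (PySem.List.sorted (fKeys node) (fun x => x)).flatMap
        (fun k => (ind ++ k.toList ++ ['\n']) ::
          (canon (fGet node k)).map (renderLine (ind ++ [' ', ' ']))) := by
  rw [canon, List.map_flatMap]
  have hattach : ∀ (G : String → List (List Char)),
      (PySem.List.sorted (fKeys node) (fun x => x)).attach.flatMap (fun kh => G kh.1) =
        (PySem.List.sorted (fKeys node) (fun x => x)).flatMap G := by
    intro G
    conv_rhs => rw [← List.attach_map_subtype_val (PySem.List.sorted (fKeys node) (fun x => x))]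
    rw [List.flatMap_map]
  rw [← hattach]
  congr 1
  funext kh
  simp only [List.map_cons]
  rw [renderLine_single]
  rw [List.map_map]
  congr 1
  apply List.map_congr_left
  intro t ht
  exact renderLine_cons ind kh.1 t (canon_ne_nil _ t ht)

theorem renderStack_eq_aux (n : Nat) :
    ∀ (st : List (String × PForest × List Char)),
      (st.map (fun e => fSize e.2.1)).sum ≤ n →
      (∀ e ∈ st, fWf e.2.1) →
      renderStack st = st.flatMap
        (fun e => (e.2.2 ++ e.1.toList ++ ['\n']) ::
          (canon e.2.1).map (renderLine (e.2.2 ++ [' ', ' ']))) := by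
  induction n with
  | zero =>
    intro st hle hwf
    cases st with
    | nil => rw [renderStack]; rfl
    | cons e rest =>
      exfalso
      have : 1 ≤ fSize e.2.1 := by
        cases h : e.2.1
        · simp [fSize]
        · simp only [fSize]
          omega
      simp only [List.map_cons, List.sum_cons] at hle
      omega
  | succ n ihn =>
    intro st hle hwf
    cases st with
    | nil => rw [renderStack]; rfl
    | cons e rest =>
      obtain ⟨name, node, ind⟩ := e
      have hwfn : fWf node := hwf _ List.mem_cons_self
      rw [renderStack]
      rw [foldl_push, desc_reverse_eq _ (fWf_keys_nodup _ hwfn)]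
      have hsum := push_children_sum_lt node (ind ++ [' ', ' ']) rest
      rw [foldl_push, desc_reverse_eq _ (fWf_keys_nodup _ hwfn)] at hsum
      simp only [List.map_cons, List.sum_cons] at hle
      have hle' : (((PySem.List.sorted (fKeys node) (fun x => x)).map
          (fun k => (k, fGet node k, ind ++ [' ', ' '])) ++ rest).map (fun e => fSize e.2.1)).sum ≤ n := by
        omega
      have hwf' : ∀ e' ∈ (PySem.List.sorted (fKeys node) (fun x => x)).map
          (fun k => (k, fGet node k, ind ++ [' ', ' '])) ++ rest, fWf e'.2.1 := by
        intro e' he'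
        rw [List.mem_append] at he'
        rcases he' with he' | he'
        · rw [List.mem_map] at he'
          obtain ⟨k, -, rfl⟩ := he'
          exact fWf_fGet _ _ hwfn
        · exact hwf _ (List.mem_cons_of_mem _ he')
      rw [ihn _ hle' hwf']
      rw [List.flatMap_append, List.flatMap_cons]
      congr 1
      rw [canon_map_renderLine node (ind ++ [' ', ' '])]
      rw [List.flatMap_map]
      rfl

theorem renderStack_eq (st : List (String × PForest × List Char))
    (hwf : ∀ e ∈ st, fWf e.2.1) :
    renderStack st = st.flatMap
      (fun e => (e.2.2 ++ e.1.toList ++ ['\n']) ::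
        (canon e.2.1).map (renderLine (e.2.2 ++ [' ', ' ']))) :=
  renderStack_eq_aux _ st le_rfl hwf

theorem format_directory_structure_spec : Claim_equal_format_directory_structure := by
  intro paths extensions _hdom
  unfold Spec_format_directory_structure
  unfold format_directory_structure format_directory_structure_alt
  dsimp only
  rw [builds_eq]
  set tree := paths.foldl
    (fun f path => insertParts f ((PySem.Str.split? path "/").getD []) extensions) PForest.nil with htree
  have hwf : fWf tree := fWf_build extensions paths
  rw [foldl_push, desc_reverse_eq _ (fWf_keys_nodup _ hwf), List.append_nil]
  have hwfst : ∀ e ∈ (PySem.List.sorted (fKeys tree) (fun x => x)).map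
      (fun name => (name, fGet tree name, ([] : List Char))), fWf e.2.1 := by
    intro e he
    rw [List.mem_map] at he
    obtain ⟨k, -, rfl⟩ := he
    exact fWf_fGet _ _ hwf
  rw [renderStack_eq _ hwfst, List.flatMap_map]
  rw [buildOutput_eq_canon, canon_map_renderLine tree []]
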